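-- pv_equiv track=rewrite | github.com/Vishnudharan24/TorpedoX | CipherGen/tempCodeRunnerFile.py | amsco_cipher_decrypt
-- ===== SOURCE A (Python) =====
-- def amsco_cipher_decrypt(ciphertext, key):
--     n = len(key)
--
--     # Calculate the number of rows
--     num_rows = len(ciphertext) // n
--
--     # Create the matrix
--     matrix = [''] * num_rows
--     for i in range(num_rows):
--         matrix[i] = ciphertext[i * n:(i + 1) * n]
--
--     # Create the key-index mapping
--     sorted_key_indices = sorted(range(len(key)), key=lambda x: key[x])
--     sorted_key_indices = [sorted_key_indices.index(i) for i in range(len(key))]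
--
--     # Reorder rows based on the sorted key
--     reordered_matrix = [''] * num_rows
--     for i in range(num_rows):
--         for idx, orig_idx in enumerate(sorted_key_indices):
--             reordered_matrix[i] += matrix[i][orig_idx]
--
--     # Remove padding and reconstruct plaintext
--     plaintext = ''.join(reordered_matrix).rstrip('X')
--
--     return plaintext
-- ===== SOURCE B (Python) =====
-- def amsco_cipher_decrypt(ciphertext, key):
--     n = len(key)
--     usable = (len(ciphertext) // n) * n  # ZeroDivisionError for empty key, as in the original
--     # rank of column c in the sorted-key order
--     order = sorted(range(n), key=lambda x: key[x])
--     # argsort: send ciphertext position p to output rank (row, column-rank), encoded as one int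
--     perm = sorted(range(usable), key=lambda p: (p // n) * n + order[p % n])
--     return ''.join(ciphertext[p] for p in perm).rstrip('X')
-- ===== Notes on version B (the rewrite author's own statement) =====
-- stated objective: faster
-- what changed: B replaces A's row matrix, quadratic .index inverse-permutation table and per-row string rebuild loops by a single argsort: it sorts the ciphertext positions by their destination rank (row*n + sorted-order rank of the position's column) and joins the characters in that order.
import Mathlib
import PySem

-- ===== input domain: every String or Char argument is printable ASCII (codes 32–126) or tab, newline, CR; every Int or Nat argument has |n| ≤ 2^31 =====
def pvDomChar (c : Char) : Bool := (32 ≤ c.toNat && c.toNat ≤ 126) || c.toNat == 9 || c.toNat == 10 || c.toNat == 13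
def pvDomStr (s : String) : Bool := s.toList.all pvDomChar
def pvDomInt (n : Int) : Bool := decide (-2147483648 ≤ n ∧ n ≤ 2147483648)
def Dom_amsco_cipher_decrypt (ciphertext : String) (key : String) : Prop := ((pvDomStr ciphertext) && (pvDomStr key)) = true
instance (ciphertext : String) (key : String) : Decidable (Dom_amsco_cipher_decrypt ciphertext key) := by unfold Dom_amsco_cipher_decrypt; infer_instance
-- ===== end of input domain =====

-- B replaces A's row matrix, quadratic `.index` inverse table and per-row rebuild loops by a single
-- argsort of the ciphertext positions by their destination rank (measured faster in a timing run).

-- ===== PORT A =====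
def amsco_cipher_decrypt (ciphertext : String) (key : String) : String :=
  let c := ciphertext.toList
  let n : Int := PySem.Str.len key
  let num_rows : Int := PySem.Int.floordiv (PySem.Str.len ciphertext) n
  -- matrix = ['']*num_rows; for i in range(num_rows): matrix[i] = ciphertext[i*n:(i+1)*n]
  let matrix : List (List Char) :=
    (PySem.List.pyRange 0 num_rows 1).foldl
      (fun m i => PySem.List.pySetD m i (PySem.List.slice c (some (i * n)) (some ((i + 1) * n))))
      (List.replicate num_rows.toNat [])
  -- sorted(range(len(key)), key=lambda x: key[x]); x is always in range so pyGetD's default is never used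
  let ski0 : List Int :=
    PySem.List.sorted (PySem.List.pyRange 0 n 1) (fun x => PySem.List.pyGetD key.toList x ' ') false
  -- [sorted_key_indices.index(i) for i in range(len(key))]; .index never raises (ski0 is a permutation
  -- of range(n)), so the `.getD 0` default is never used
  let ski : List Int :=
    (PySem.List.pyRange 0 n 1).map (fun i => (((PySem.List.index? ski0 i).getD 0 : Nat) : Int))
  -- for i in range(num_rows): for idx, orig_idx in enumerate(ski): reordered[i] += matrix[i][orig_idx]
  let reordered : List (List Char) :=
    (PySem.List.pyRange 0 num_rows 1).foldl
      (fun r i =>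
        (PySem.List.enumerate ski 0).foldl
          (fun r p => PySem.List.pySetD r i
            (PySem.List.pyGetD r i [] ++ [PySem.List.pyGetD (PySem.List.pyGetD matrix i []) p.2 ' ']))
          r)
      (List.replicate num_rows.toNat [])
  let plaintext := PySem.Chars.join [] reordered
  -- .rstrip('X'): exact hand port (drop every trailing 'X')
  String.ofList (List.reverse (List.dropWhile (fun ch => ch == 'X') plaintext.reverse))

-- ===== PORT B =====
def amsco_cipher_decrypt_alt (ciphertext : String) (key : String) : String :=
  let c := ciphertext.toList
  let n : Int := PySem.Str.len key
  let usable : Int := PySem.Int.floordiv (PySem.Str.len ciphertext) n * n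
  -- order = sorted(range(n), key=lambda x: key[x]); x always in range, so pyGetD's default is unused
  let order : List Int :=
    PySem.List.sorted (PySem.List.pyRange 0 n 1) (fun x => PySem.List.pyGetD key.toList x ' ') false
  -- perm = sorted(range(usable), key=lambda p: (p // n) * n + order[p % n]); p % n is in range
  let perm : List Int :=
    PySem.List.sorted (PySem.List.pyRange 0 usable 1)
      (fun p => PySem.Int.floordiv p n * n + PySem.List.pyGetD order (PySem.Int.mod p n) 0) false
  -- ''.join(ciphertext[p] for p in perm); every p is a valid index
  let out : List Char := PySem.Chars.join [] (perm.map (fun p => [PySem.List.pyGetD c p ' ']))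
  -- .rstrip('X'): exact hand port (drop every trailing 'X')
  String.ofList (List.reverse (List.dropWhile (fun ch => ch == 'X') out.reverse))

-- ===== PRECONDITION & SPEC =====
-- Pre_ excludes only the empty key, on which A raises ZeroDivisionError (len(ciphertext) // 0).
def Pre_amsco_cipher_decrypt (ciphertext : String) (key : String) : Prop := key.toList ≠ []
instance (ciphertext : String) (key : String) : Decidable (Pre_amsco_cipher_decrypt ciphertext key) := by
  unfold Pre_amsco_cipher_decrypt; infer_instance
def pvWitness_amsco_cipher_decrypt : String × String := ("ELHLOXWLRDOXX!", "bac")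
def Spec_amsco_cipher_decrypt (ciphertext : String) (key : String) (out : String) : Prop := out = amsco_cipher_decrypt_alt ciphertext key
instance (ciphertext : String) (key : String) (out : String) : Decidable (Spec_amsco_cipher_decrypt ciphertext key out) := by unfold Spec_amsco_cipher_decrypt; infer_instance

-- ===== CLAIM (what is proved, stated in full; the proofs are below) =====
def Claim_equal_amsco_cipher_decrypt : Prop := ∀ (ciphertext : String) (key : String), Dom_amsco_cipher_decrypt ciphertext key → Pre_amsco_cipher_decrypt ciphertext key → Spec_amsco_cipher_decrypt ciphertext key (amsco_cipher_decrypt ciphertext key)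

-- ===== LEMMAS AND PROOFS =====

-- ''.join(parts) is concatenation
lemma pvJoinNil : ∀ (ls : List (List Char)), PySem.Chars.join [] ls = ls.flatten := by
  intro ls
  induction ls with
  | nil => rfl
  | cons a t ih =>
    cases t with
    | nil => simp [PySem.Chars.join, List.intercalate]
    | cons b t' =>
      simp only [PySem.Chars.join, List.intercalate, List.intersperse] at ih ⊢
      simp_all

lemma pvTakeSet {α : Type} (m : List α) (b : Nat) (v : α) (h : b < m.length) :
    (m.set b v).take (b + 1) = m.take b ++ [v] := by
  apply List.ext_getElem
  · simp; omega
  · intro i h1 h2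
    simp only [List.length_take, List.length_set] at h1
    by_cases hib : i < b
    · simp [List.getElem_take, List.getElem_append, hib, Nat.ne_of_gt hib]
      omega
    · have : i = b := by omega
      subst this
      simp [List.getElem_take, List.getElem_set]

-- a loop 'for i in range(b, R): xs[i] = g(i, xs[i])' rewrites the tail of xs pointwise
lemma pvSetLoop {α : Type} (F : List α → Int → List α) (g : Nat → α → α) (d : α)
    (hF : ∀ (r : List α) (i : Nat), i < r.length →
      F r (i : Int) = PySem.List.pySetD r (i : Int) (g i (PySem.List.pyGetD r (i : Int) d))) :
    ∀ (t b : Nat) (m : List α), m.length = b + t →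
      (PySem.List.pyRange (b : Int) ((b + t : Nat) : Int) 1).foldl F m
        = m.take b ++ (List.range' b t).map (fun i => g i (m.getD i d)) := by
  intro t
  induction t with
  | zero =>
    intro b m hm
    rw [PySem.List.pyRange_one_eq_nil (by exact_mod_cast Nat.le_of_eq rfl)]
    simp [List.take_of_length_le (by omega : m.length ≤ b)]
  | succ t ih =>
    intro b m hm
    rw [PySem.List.pyRange_one_cons (by exact_mod_cast (by omega : b < b + (t + 1)))]
    simp only [List.foldl_cons]
    rw [hF m b (by omega)]
    rw [PySem.List.pySetD_natCast, PySem.List.pyGetD_natCast]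
    have h1 : ((b : Int) + 1) = ((b + 1 : Nat) : Int) := by push_cast; ring
    have h2 : ((b + (t + 1) : Nat) : Int) = ((b + 1 + t : Nat) : Int) := by push_cast; ring
    rw [h1, h2, ih (b + 1) _ (by simp [hm]; omega)]
    rw [List.range'_succ, List.map_cons]
    rw [pvTakeSet _ _ _ (by omega)]
    rw [List.append_assoc, List.singleton_append]
    congr 1
    congr 1
    apply List.map_congr_left
    intro i hi
    have hmem := List.mem_range'_1.mp hi
    congr 1
    simp only [List.getD]
    rw [List.getElem?_set_ne (by omega)]

-- the inner 'reordered[i] += ch' loop appends the whole mapped list at index i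
lemma pvInnerLoop {β : Type} (i : Nat) (hfc : β → Char) :
    ∀ (l : List β) (r : List (List Char)), i < r.length →
      l.foldl (fun r p => PySem.List.pySetD r (i : Int)
          (PySem.List.pyGetD r (i : Int) [] ++ [hfc p])) r
        = PySem.List.pySetD r (i : Int) (PySem.List.pyGetD r (i : Int) [] ++ l.map hfc) := by
  intro l
  induction l with
  | nil =>
    intro r hr
    simp only [List.foldl_nil, List.map_nil, List.append_nil]
    rw [PySem.List.pySetD_natCast, PySem.List.pyGetD_natCast,
      List.getD_eq_getElem _ _ hr, List.set_getElem_self]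
  | cons p t ih =>
    intro r hr
    simp only [List.foldl_cons]
    rw [ih _ (by rw [PySem.List.pySetD_natCast, List.length_set]; exact hr)]
    simp only [PySem.List.pySetD_natCast, PySem.List.pyGetD_natCast]
    rw [List.set_set]
    have hlen : i < (r.set i (r.getD i [] ++ [hfc p])).length := by simpa using hr
    rw [List.getD_eq_getElem _ _ hlen, List.getElem_set_self]
    · simp [List.map_cons]

-- the position of j in a permutation `order` of range(n)
def pvInv (order : List Int) (j : Nat) : Nat := (PySem.List.index? order ((j : Nat) : Int)).getD 0

-- facts about pvInv on a permutation of range(nn)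
lemma pvInvSpec (order : List Int) (nn : Nat) (hperm : order.Perm (PySem.List.pyRange 0 (nn : Int) 1))
    (j : Nat) (hj : j < nn) :
    ∃ h : pvInv order j < order.length, order[pvInv order j] = (j : Int) := by
  have hmem : ((j : Int)) ∈ order := by
    rw [hperm.mem_iff, PySem.List.mem_pyRange_one]
    constructor <;> [exact Int.natCast_nonneg j; exact_mod_cast hj]
  obtain ⟨k, hk⟩ := Option.isSome_iff_exists.mp ((PySem.List.index?_isSome_iff _ _).mpr hmem)
  obtain ⟨hklen, hkval, _⟩ := PySem.List.getElem_of_index?_eq_some hk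
  have hpv : pvInv order j = k := by simp only [pvInv, hk, Option.getD_some]
  rw [hpv]
  exact ⟨hklen, hkval⟩

-- the canonical value of both programs before rstrip, and the index lists behind it
def pvIdx (order : List Int) (nn R : Nat) : List Nat :=
  (List.range R).flatMap (fun i => (List.range nn).map (fun j => i * nn + pvInv order j))

lemma pvRangeMulFlat (nn : Nat) : ∀ (R : Nat),
    List.range (R * nn) = (List.range R).flatMap (fun i => (List.range nn).map (fun j => i * nn + j)) := by
  intro R
  induction R with
  | zero => simp
  | succ R ih =>
    rw [Nat.succ_mul, List.range_add, ih, List.range_succ]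
    simp

lemma pvInvPermRange (order : List Int) (nn : Nat)
    (hperm : order.Perm (PySem.List.pyRange 0 (nn : Int) 1)) :
    ((List.range nn).map (pvInv order)).Perm (List.range nn) := by
  have hlenord : order.length = nn := by
    have := hperm.length_eq
    simpa [PySem.List.pyRange_zero_natCast] using this
  have hlt : ∀ j < nn, pvInv order j < nn := fun j hj => by
    obtain ⟨h, _⟩ := pvInvSpec order nn hperm j hj
    omega
  have hinj : ∀ j1 < nn, ∀ j2 < nn, pvInv order j1 = pvInv order j2 → j1 = j2 := by
    intro j1 h1 j2 h2 he
    obtain ⟨ha, hva⟩ := pvInvSpec order nn hperm j1 h1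
    obtain ⟨hb, hvb⟩ := pvInvSpec order nn hperm j2 h2
    have : ((j1 : Int)) = ((j2 : Int)) := by rw [← hva, ← hvb]; congr 1
    exact_mod_cast this
  have hnd : ((List.range nn).map (pvInv order)).Nodup := by
    rw [List.nodup_iff_getElem?_ne_getElem?]
    intro i j hij hjlen
    simp only [List.length_map, List.length_range] at hjlen
    simp only [List.getElem?_map, List.getElem?_range (by omega : i < nn), List.getElem?_range hjlen]
    simp only [Option.map_some, ne_eq, Option.some.injEq]
    intro he
    exact absurd (hinj i (by omega) j hjlen he) (by omega)
  apply List.perm_of_nodup_nodup_toFinset_eq hnd (List.nodup_range)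
  apply Finset.eq_of_subset_of_card_le
  · intro x hx
    simp only [List.mem_toFinset, List.mem_map, List.mem_range] at hx ⊢
    obtain ⟨j, hj, rfl⟩ := hx
    exact hlt j hj
  · rw [List.toFinset_card_of_nodup List.nodup_range, List.toFinset_card_of_nodup hnd]
    simp

-- B's key, evaluated at the index i*nn + pvInv j, is the destination rank i*nn + j
lemma pvIdxKey (order : List Int) (nn R : Nat) (hnn : 0 < nn)
    (hperm : order.Perm (PySem.List.pyRange 0 (nn : Int) 1)) :
    ((pvIdx order nn R).map (fun k => ((k : Nat) : Int))).map
      (fun p => PySem.Int.floordiv p (nn : Int) * (nn : Int)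
        + PySem.List.pyGetD order (PySem.Int.mod p (nn : Int)) 0)
      = (List.range (R * nn)).map (fun k => ((k : Nat) : Int)) := by
  have hlenord : order.length = nn := by
    have := hperm.length_eq
    simpa [PySem.List.pyRange_zero_natCast] using this
  rw [List.map_map]
  unfold pvIdx
  rw [List.map_flatMap, pvRangeMulFlat, List.map_flatMap]
  apply List.flatMap_congr
  intro i _
  rw [List.map_map, List.map_map]
  apply List.map_congr_left
  intro j hj
  rw [List.mem_range] at hj
  obtain ⟨hk, hkv⟩ := pvInvSpec order nn hperm j hj
  have hklt : pvInv order j < nn := by omega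
  simp only [Function.comp_apply]
  have h1 : PySem.Int.floordiv ((i * nn + pvInv order j : Nat) : Int) ((nn : Nat) : Int)
      = ((i : Nat) : Int) := by
    rw [PySem.Int.floordiv_natCast]
    congr 1
    rw [Nat.add_comm, Nat.add_mul_div_right _ _ hnn, Nat.div_eq_of_lt hklt, Nat.zero_add]
  have h2 : PySem.Int.mod ((i * nn + pvInv order j : Nat) : Int) ((nn : Nat) : Int)
      = ((pvInv order j : Nat) : Int) := by
    rw [PySem.Int.mod_natCast]
    congr 1
    rw [Nat.add_comm, Nat.add_mul_mod_self_right, Nat.mod_eq_of_lt hklt]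
  rw [h1, h2, PySem.List.pyGetD_natCast, List.getD_eq_getElem _ _ hk, hkv]
  push_cast
  ring

-- B's sort of positions is exactly the index list pvIdx (cast to Int)
lemma pvPermEq (order : List Int) (nn R : Nat) (hnn : 0 < nn)
    (hperm : order.Perm (PySem.List.pyRange 0 (nn : Int) 1)) :
    PySem.List.sorted (PySem.List.pyRange 0 ((R * nn : Nat) : Int) 1)
      (fun p => PySem.Int.floordiv p (nn : Int) * (nn : Int)
        + PySem.List.pyGetD order (PySem.Int.mod p (nn : Int)) 0) false
      = (pvIdx order nn R).map (fun k => ((k : Nat) : Int)) := by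
  apply PySem.List.sorted_eq_of_perm_of_pairwise_lt
  · rw [PySem.List.pyRange_zero_natCast]
    apply List.Perm.map
    unfold pvIdx
    rw [pvRangeMulFlat]
    refine (List.Perm.refl _).flatMap ?_
    intro i _
    have he : (List.range nn).map (fun j => i * nn + pvInv order j)
        = ((List.range nn).map (pvInv order)).map (fun x => i * nn + x) := by
      rw [List.map_map]; rfl
    rw [he]
    exact (pvInvPermRange order nn hperm).map _
  · refine List.pairwise_map.mp ?_
    rw [pvIdxKey order nn R hnn hperm]
    exact List.pairwise_map.mpr (List.pairwise_lt_range.imp (fun h => by exact_mod_cast h))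

-- ===== VERDICT (by name: the statement is the Claim_ definition above) =====
theorem amsco_cipher_decrypt_spec : Claim_equal_amsco_cipher_decrypt := by
  unfold Claim_equal_amsco_cipher_decrypt
  intro ciphertext key _ hpre
  unfold Pre_amsco_cipher_decrypt at hpre
  simp only [Spec_amsco_cipher_decrypt, amsco_cipher_decrypt, amsco_cipher_decrypt_alt]
  have hnn : 0 < key.toList.length := List.length_pos_of_ne_nil hpre
  set c := ciphertext.toList with hc
  set nn := key.toList.length with hnndef
  set R := c.length / nn with hRdef
  have hRle : R * nn ≤ c.length := Nat.div_mul_le_self _ _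
  have hlenkey : PySem.Str.len key = ((nn : Nat) : Int) := PySem.Str.len_eq key
  have hlenct : PySem.Str.len ciphertext = ((c.length : Nat) : Int) := PySem.Str.len_eq ciphertext
  rw [hlenkey, hlenct]
  have hfd : PySem.Int.floordiv ((c.length : Nat) : Int) ((nn : Nat) : Int) = ((R : Nat) : Int) :=
    PySem.Int.floordiv_natCast _ _
  rw [hfd]
  have husable : ((R : Nat) : Int) * ((nn : Nat) : Int) = ((R * nn : Nat) : Int) := by push_cast; ring
  rw [husable, Int.toNat_natCast]
  set order : List Int :=
    PySem.List.sorted (PySem.List.pyRange 0 ((nn : Nat) : Int) 1)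
      (fun x => PySem.List.pyGetD key.toList x ' ') false with horderdef
  have horder : order.Perm (PySem.List.pyRange 0 ((nn : Nat) : Int) 1) :=
    PySem.List.sorted_perm _ _ _
  -- B side: the sorted position list is pvIdx, and the join of singletons is the mapped list
  have hB : PySem.Chars.join []
      (List.map (fun p => [PySem.List.pyGetD c p ' '])
        (PySem.List.sorted (PySem.List.pyRange 0 ((R * nn : Nat) : Int) 1)
          (fun p => PySem.Int.floordiv p ((nn : Nat) : Int) * ((nn : Nat) : Int)
            + PySem.List.pyGetD order (PySem.Int.mod p ((nn : Nat) : Int)) 0) false))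
      = (pvIdx order nn R).map (fun k => c.getD k ' ') := by
    rw [pvPermEq order nn R hnn horder, List.map_map]
    have hsplit : ((fun p => [PySem.List.pyGetD c p ' ']) ∘ fun k : Nat => ((k : Nat) : Int))
        = (fun ch => [ch]) ∘ (fun k : Nat => PySem.List.pyGetD c ((k : Nat) : Int) ' ') := rfl
    rw [hsplit, ← List.map_map, PySem.Chars.join_nil_singletons]
    apply List.map_congr_left
    intro k _
    rw [PySem.List.pyGetD_natCast]
  rw [hB]
  -- A side: evaluate the matrix-building loop
  have hmat : (PySem.List.pyRange 0 ((R : Nat) : Int) 1).foldl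
      (fun m i => PySem.List.pySetD m i
        (PySem.List.slice c (some (i * ((nn : Nat) : Int))) (some ((i + 1) * ((nn : Nat) : Int)))))
      (List.replicate R [])
      = (List.range R).map (fun i : Nat =>
          PySem.List.slice c (some (((i : Nat) : Int) * ((nn : Nat) : Int)))
            (some ((((i : Nat) : Int) + 1) * ((nn : Nat) : Int)))) := by
    have h := pvSetLoop
      (fun m i => PySem.List.pySetD m i
        (PySem.List.slice c (some (i * ((nn : Nat) : Int))) (some ((i + 1) * ((nn : Nat) : Int)))))
      (fun (i : Nat) (_ : List Char) =>
        PySem.List.slice c (some (((i : Nat) : Int) * ((nn : Nat) : Int)))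
          (some ((((i : Nat) : Int) + 1) * ((nn : Nat) : Int))))
      [] (fun r i _ => rfl) R 0 (List.replicate R []) (by simp)
    simpa [← List.range_eq_range'] using h
  rw [hmat]
  set M : List (List Char) := (List.range R).map (fun i : Nat =>
      PySem.List.slice c (some (((i : Nat) : Int) * ((nn : Nat) : Int)))
        (some ((((i : Nat) : Int) + 1) * ((nn : Nat) : Int)))) with hM
  set ski : List Int :=
    (PySem.List.pyRange 0 ((nn : Nat) : Int) 1).map
      (fun i => (((PySem.List.index? order i).getD 0 : Nat) : Int)) with hski
  -- evaluate the row-reordering double loop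
  have hreo : (PySem.List.pyRange 0 ((R : Nat) : Int) 1).foldl
      (fun r i =>
        (PySem.List.enumerate ski 0).foldl
          (fun r p => PySem.List.pySetD r i
            (PySem.List.pyGetD r i [] ++
              [PySem.List.pyGetD (PySem.List.pyGetD M i []) p.2 ' ']))
          r)
      (List.replicate R [])
      = (List.range R).map (fun i : Nat =>
          (PySem.List.enumerate ski 0).map
            (fun p => PySem.List.pyGetD (PySem.List.pyGetD M ((i : Nat) : Int) []) p.2 ' ')) := by
    have h := pvSetLoop
      (fun r i =>
        (PySem.List.enumerate ski 0).foldl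
          (fun r p => PySem.List.pySetD r i
            (PySem.List.pyGetD r i [] ++
              [PySem.List.pyGetD (PySem.List.pyGetD M i []) p.2 ' ']))
          r)
      (fun (i : Nat) (old : List Char) => old ++
        (PySem.List.enumerate ski 0).map
          (fun p => PySem.List.pyGetD (PySem.List.pyGetD M ((i : Nat) : Int) []) p.2 ' '))
      [] (fun r i hi => pvInnerLoop i _ (PySem.List.enumerate ski 0) r hi)
      R 0 (List.replicate R []) (by simp)
    simpa [← List.range_eq_range'] using h
  rw [hreo]
  have hlenord : order.length = nn := by
    have := horder.length_eq
    simpa [PySem.List.pyRange_zero_natCast] using this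
  suffices hmain : PySem.Chars.join []
      ((List.range R).map (fun i : Nat =>
        (PySem.List.enumerate ski 0).map
          (fun p => PySem.List.pyGetD (PySem.List.pyGetD M ((i : Nat) : Int) []) p.2 ' ')))
      = (pvIdx order nn R).map (fun k => c.getD k ' ') by rw [hmain]
  rw [pvJoinNil, ← List.flatMap_def]
  unfold pvIdx
  rw [List.map_flatMap]
  apply List.flatMap_congr
  intro i hi
  rw [List.mem_range] at hi
  -- the stored row i of the matrix
  have hMi : PySem.List.pyGetD M ((i : Nat) : Int) []
      = PySem.List.slice c (some (((i : Nat) : Int) * ((nn : Nat) : Int)))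
          (some ((((i : Nat) : Int) + 1) * ((nn : Nat) : Int))) := by
    rw [PySem.List.pyGetD_natCast, List.getD_eq_getElem _ _ (by simpa [hM] using hi)]
    simp [hM]
  rw [hMi]
  -- iterating over enumerate(ski) reads just the second components, i.e. ski itself
  have henum : ∀ (S : List Char),
      (PySem.List.enumerate ski 0).map (fun p => PySem.List.pyGetD S p.2 ' ')
        = ski.map (fun v => PySem.List.pyGetD S v ' ') := by
    intro S
    have hcomp : (fun p : Int × Int => PySem.List.pyGetD S p.2 ' ')
        = (fun v => PySem.List.pyGetD S v ' ') ∘ (fun p : Int × Int => p.2) := rfl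
    rw [hcomp, ← List.map_map, PySem.List.map_snd_enumerate]
  rw [henum]
  -- ski is the inverse-position table
  have hski' : ski = (List.range nn).map (fun j : Nat => ((pvInv order j : Nat) : Int)) := by
    rw [hski, PySem.List.pyRange_zero_natCast, List.map_map]; rfl
  rw [hski', List.map_map, List.map_map]
  apply List.map_congr_left
  intro j hj
  rw [List.mem_range] at hj
  obtain ⟨hkord, _⟩ := pvInvSpec order nn horder j hj
  have hk : pvInv order j < nn := by omega
  have hiend : (i + 1) * nn ≤ c.length :=
    le_trans (Nat.mul_le_mul_right _ (by omega : i + 1 ≤ R)) hRle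
  have hbound : i * nn + pvInv order j < c.length := by
    have : i * nn + pvInv order j < (i + 1) * nn := by rw [Nat.succ_mul]; omega
    omega
  simp only [Function.comp_apply]
  have hc1 : (((i : Nat) : Int) * ((nn : Nat) : Int)) = ((i * nn : Nat) : Int) := by push_cast; ring
  have hc2 : ((((i : Nat) : Int) + 1) * ((nn : Nat) : Int)) = (((i + 1) * nn : Nat) : Int) := by
    push_cast; ring
  rw [hc1, hc2, PySem.List.slice_natCast, PySem.List.pyGetD_natCast]
  have hsub : (i + 1) * nn - i * nn = nn := by rw [Nat.succ_mul]; omega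
  rw [hsub]
  have hlt : pvInv order j < (List.take nn (List.drop (i * nn) c)).length := by
    simp only [List.length_take, List.length_drop]
    omega
  rw [List.getD_eq_getElem _ _ hlt, List.getD_eq_getElem _ _ hbound,
    List.getElem_take, List.getElem_drop]
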